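-- pv_equiv track=rewrite | github.com/Bobcatsoap/jy-server | cell/RoomType6InitiativeTactics.py | enemy_one_poke
-- ===== SOURCE A (Python) =====
-- def enemy_one_poke(chapter_info, split_cards_dic):
--     """
--     敌人一张牌
--     """
--     # 优先出非单张
--     for k, v in split_cards_dic.items():
--         if k == "danZhang":
--             continue
--         for _ in v:
--             return _
--
--     # 如果除了单张没有别的，优先出大的
--     for k, v in split_cards_dic.items():
--         if k == "danZhang":
--             v2 = sorted(v, key=lambda x: x[0], reverse=True)
--             for _ in v2:
--                 return _
-- ===== SOURCE B (Python) =====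
-- def enemy_one_poke(chapter_info, split_cards_dic):
--     """
--     敌人一张牌
--     """
--     # single pass: return the first non-danZhang card immediately,
--     # remember the danZhang pile for the fallback
--     dan = None
--     for k, v in split_cards_dic.items():
--         if k == "danZhang":
--             dan = v
--         elif v:
--             return v[0]
--     if dan:
--         return max(dan, key=lambda x: x[0])
--     return None
-- ===== Notes on version B (the rewrite author's own statement) =====
-- stated objective: alternative
-- what changed: One pass over the dict capturing the danZhang pile on the way instead of two full scans, and the fallback takes max(key=first element) in O(n) instead of fully sorting the pile.
import Mathlib
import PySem

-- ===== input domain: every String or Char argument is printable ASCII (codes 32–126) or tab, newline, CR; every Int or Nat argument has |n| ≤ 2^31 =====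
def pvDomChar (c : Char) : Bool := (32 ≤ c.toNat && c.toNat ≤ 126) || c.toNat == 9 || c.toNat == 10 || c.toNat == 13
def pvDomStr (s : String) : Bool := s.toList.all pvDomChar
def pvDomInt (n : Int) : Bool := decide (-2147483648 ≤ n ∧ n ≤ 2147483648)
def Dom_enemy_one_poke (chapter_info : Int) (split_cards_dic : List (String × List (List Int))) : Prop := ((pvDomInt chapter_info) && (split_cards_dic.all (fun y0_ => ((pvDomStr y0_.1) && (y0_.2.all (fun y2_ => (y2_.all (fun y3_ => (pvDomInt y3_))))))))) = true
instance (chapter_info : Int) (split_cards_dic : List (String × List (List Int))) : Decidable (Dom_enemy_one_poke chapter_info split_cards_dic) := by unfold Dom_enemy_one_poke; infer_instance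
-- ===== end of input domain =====

-- B makes one pass over the dict (capturing the danZhang pile on the way) and takes a max
-- instead of A's two full scans with a sort; equivalence of the return values is proved below.

-- ===== PORT A =====
-- first loop of A: first card of the first non-danZhang non-empty pile
def pvLoop1 : List (String × List (List Int)) → Option (List Int)
  | [] => none
  | (k, v) :: rest =>
    if k == "danZhang" then pvLoop1 rest
    else match v with
      | [] => pvLoop1 rest
      | c :: _ => some c

-- second loop of A: sort the danZhang pile descending by first element, return its first card.
-- key lambda x: x[0] is ported as headD 0: exact on every card the sort's key is applied to,
-- since Pre_ excludes the inputs where Python's x[0] would raise IndexError here.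
def pvLoop2 : List (String × List (List Int)) → Option (List Int)
  | [] => none
  | (k, v) :: rest =>
    if k == "danZhang" then
      match (PySem.List.sorted v (fun x => x.headD 0) true).head? with
      | some c => some c
      | none => pvLoop2 rest
    else pvLoop2 rest

def enemy_one_poke (chapter_info : Int) (split_cards_dic : List (String × List (List Int))) : Option (List Int) :=
  match pvLoop1 split_cards_dic with
  | some c => some c
  | none => pvLoop2 split_cards_dic

-- ===== PORT B =====
-- 'if dan: return max(dan, key=lambda x: x[0])  else: return None' (key as in A's port)
def pvFinish : Option (List (List Int)) → Option (List Int)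
  | some (c :: cs) => PySem.List.max? (c :: cs) (fun x => x.headD 0)
  | _ => none

-- B's single loop, carrying the captured danZhang pile
def pvScan : List (String × List (List Int)) → Option (List (List Int)) → Option (List Int)
  | [], dan => pvFinish dan
  | (k, v) :: rest, dan =>
    if k == "danZhang" then pvScan rest (some v)
    else match v with
      | [] => pvScan rest dan
      | c :: _ => some c

def enemy_one_poke_alt (chapter_info : Int) (split_cards_dic : List (String × List (List Int))) : Option (List Int) :=
  pvScan split_cards_dic none

-- ===== PRECONDITION & SPEC =====
-- Pre_ excludes (a) association lists with duplicate keys, which a Python dict cannot represent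
-- (A's behaviour there would be an accident of the encoding), and (b) the inputs on which A
-- raises IndexError: the fallback is reached and the danZhang pile contains an empty card.
def Pre_enemy_one_poke (chapter_info : Int) (split_cards_dic : List (String × List (List Int))) : Prop :=
  (split_cards_dic.map Prod.fst).Nodup ∧
  ((∃ kv ∈ split_cards_dic, kv.1 ≠ "danZhang" ∧ kv.2 ≠ []) ∨
   (∀ kv ∈ split_cards_dic, kv.1 = "danZhang" → [] ∉ kv.2))
instance (chapter_info : Int) (split_cards_dic : List (String × List (List Int))) : Decidable (Pre_enemy_one_poke chapter_info split_cards_dic) := by unfold Pre_enemy_one_poke; infer_instance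

def pvWitness_enemy_one_poke : Int × (List (String × List (List Int))) :=
  (0, [("feiJi", [[3, 3, 3]]), ("danZhang", [[5], [2]])])

def Spec_enemy_one_poke (chapter_info : Int) (split_cards_dic : List (String × List (List Int))) (out : Option (List Int)) : Prop := out = enemy_one_poke_alt chapter_info split_cards_dic
instance (chapter_info : Int) (split_cards_dic : List (String × List (List Int))) (out : Option (List Int)) : Decidable (Spec_enemy_one_poke chapter_info split_cards_dic out) := by unfold Spec_enemy_one_poke; infer_instance

-- ===== CLAIM (what is proved, stated in full; the proofs are below) =====
def Claim_equal_enemy_one_poke : Prop := ∀ (chapter_info : Int) (split_cards_dic : List (String × List (List Int))), Dom_enemy_one_poke chapter_info split_cards_dic → Pre_enemy_one_poke chapter_info split_cards_dic → Spec_enemy_one_poke chapter_info split_cards_dic (enemy_one_poke chapter_info split_cards_dic)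

-- ===== LEMMAS AND PROOFS =====

-- head of insertBy
theorem pv_head_insertBy {α : Type} (bf : α → α → Bool) (x : α) (acc : List α) :
    (PySem.List.insertBy bf x acc).head? =
      (match acc.head? with
       | none => some x
       | some y => if bf x y then some x else some y) := by
  cases acc with
  | nil => simp [PySem.List.insertBy]
  | cons y ys =>
    by_cases h : bf x y
    · simp [PySem.List.insertBy, h]
    · simp [PySem.List.insertBy, h]

-- head of an insertBy fold = a running-max fold over head?
theorem pv_head_foldl_insertBy {α : Type} (bf : α → α → Bool) (xs : List α) (acc : List α) :
    (xs.foldl (fun a x => PySem.List.insertBy bf x a) acc).head? =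
      xs.foldl (fun o x =>
        match o with
        | none => some x
        | some y => if bf x y then some x else some y) acc.head? := by
  induction xs generalizing acc with
  | nil => rfl
  | cons x t ih =>
    simp only [List.foldl_cons]
    rw [ih, pv_head_insertBy]

-- the head of a stable reverse sort is Python's max(…, key=…): the first key-maximal element
theorem pv_head_sorted_rev_eq_max? (xs : List (List Int)) (key : List Int → Int) :
    (PySem.List.sorted xs key true).head? = PySem.List.max? xs key := by
  unfold PySem.List.sorted PySem.List.max?
  rw [if_pos rfl, pv_head_foldl_insertBy]
  simp only [List.head?_nil]
  congr 1
  funext o x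
  cases o with
  | none => rfl
  | some y => simp

-- A's second loop returns nothing on a list without a danZhang entry
theorem pv_loop2_not_mem (l : List (String × List (List Int)))
    (h : "danZhang" ∉ l.map Prod.fst) : pvLoop2 l = none := by
  induction l with
  | nil => rfl
  | cons kv rest ih =>
    obtain ⟨k, v⟩ := kv
    simp only [List.map_cons, List.mem_cons, not_or] at h
    have hk : (k == "danZhang") = false := beq_eq_false_iff_ne.mpr (fun e => h.1 e.symm)
    simp only [pvLoop2, hk, Bool.false_eq_true, if_false]
    exact ih h.2

-- main invariant for B's single pass
theorem pv_scan_eq (l : List (String × List (List Int))) (dan : Option (List (List Int)))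
    (hnd : (l.map Prod.fst).Nodup) :
    pvScan l dan =
      (match pvLoop1 l with
       | some c => some c
       | none =>
         if "danZhang" ∈ l.map Prod.fst then pvLoop2 l else pvFinish dan) := by
  induction l generalizing dan with
  | nil => rfl
  | cons kv rest ih =>
    obtain ⟨k, v⟩ := kv
    simp only [List.map_cons, List.nodup_cons] at hnd
    by_cases hk : k = "danZhang"
    · subst hk
      have hrest : "danZhang" ∉ rest.map Prod.fst := hnd.1
      have h2 : pvLoop2 rest = none := pv_loop2_not_mem rest hrest
      have e0 : pvScan (("danZhang", v) :: rest) dan = pvScan rest (some v) := by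
        simp [pvScan]
      have e1 : pvLoop1 (("danZhang", v) :: rest) = pvLoop1 rest := by
        simp [pvLoop1]
      have e2 : pvLoop2 (("danZhang", v) :: rest) = PySem.List.max? v (fun x => x.headD 0) := by
        simp only [pvLoop2, if_pos (show (("danZhang" : String) == "danZhang") = true by simp)]
        rw [pv_head_sorted_rev_eq_max?]
        cases PySem.List.max? v (fun x => x.headD 0) with
        | none => simp [h2]
        | some m => simp
      have e3 : pvFinish (some v) = PySem.List.max? v (fun x => x.headD 0) := by
        cases v <;> rfl
      rw [e0, ih (some v) hnd.2, e1]
      cases pvLoop1 rest with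
      | some c => simp
      | none => simp [hrest, e2, e3, List.mem_cons]
    · have hbeq : (k == "danZhang") = false := beq_eq_false_iff_ne.mpr hk
      have hmem : ("danZhang" ∈ k :: rest.map Prod.fst) = ("danZhang" ∈ rest.map Prod.fst) := by
        simp [List.mem_cons, show "danZhang" ≠ k from fun e => hk e.symm]
      simp only [pvScan, pvLoop1, pvLoop2, hbeq, Bool.false_eq_true, if_false]
      cases v with
      | nil =>
        rw [ih dan hnd.2]
        simp only [List.map_cons, hmem]
      | cons c cs => rfl

-- ===== VERDICT (by name: the statement is the Claim_ definition above) =====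
theorem enemy_one_poke_spec : Claim_equal_enemy_one_poke := by
  intro chapter_info dic _ hpre
  unfold Spec_enemy_one_poke enemy_one_poke enemy_one_poke_alt
  rw [pv_scan_eq dic none hpre.1]
  cases pvLoop1 dic with
  | some c => simp
  | none =>
    by_cases hmem : "danZhang" ∈ dic.map Prod.fst
    · simp [hmem]
    · simp [hmem, pvFinish, pv_loop2_not_mem dic hmem]
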